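-- pv_equiv track=rewrite | github.com/TedYav/CodingChallenges | HackerRank/Challenges/Week Of Code 28/the_great_xor.py | num_xors
-- ===== SOURCE A (Python) =====
-- def num_xors(x):
-- 	pow = 0
-- 	num = 0
-- 	while x > 0:
-- 		if not x & 1:
-- 			num += 2 ** pow
-- 		x >>= 1
-- 		pow += 1
-- 	return num
-- ===== SOURCE B (Python) =====
-- def num_xors(x):
--     if x <= 0:
--         return 0
--     return (1 << x.bit_length()) - 1 - x
-- ===== Notes on version B (the rewrite author's own statement) =====
-- stated objective: faster
-- what changed: Replaced the per-bit scanning loop by the closed form (1 << bit_length(x)) - 1 - x (mask of all bits below the top bit minus the set bits), with 0 for non-positive x.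
import Mathlib
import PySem

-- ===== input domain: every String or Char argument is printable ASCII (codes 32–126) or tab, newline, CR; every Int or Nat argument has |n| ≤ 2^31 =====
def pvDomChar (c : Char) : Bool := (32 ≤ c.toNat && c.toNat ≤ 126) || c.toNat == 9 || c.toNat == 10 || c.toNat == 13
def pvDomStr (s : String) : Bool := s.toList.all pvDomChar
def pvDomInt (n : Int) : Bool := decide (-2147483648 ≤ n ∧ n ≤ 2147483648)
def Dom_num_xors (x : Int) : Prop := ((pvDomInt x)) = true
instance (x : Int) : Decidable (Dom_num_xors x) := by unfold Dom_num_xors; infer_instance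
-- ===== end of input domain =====

-- B replaces A's per-bit while-loop by the closed form (1 << bit_length x) - 1 - x (0 for x ≤ 0); objective: faster (constant-time arithmetic).

-- ===== PORT A =====
-- termination helper for the while-loop: x >> 1 shrinks x.toNat while x > 0
theorem pvShiftLt (x : Int) (h : 0 < x) : (x >>> (1:Nat)).toNat < x.toNat := by
  have : x >>> (1:Nat) = x / 2 := by
    simpa using Int.shiftRight_eq_div_pow x 1
  rw [this]; omega

def numXorsLoop (x pow num : Int) : Int :=
  if h : 0 < x then
    numXorsLoop (x >>> (1:Nat)) (pow + 1)
      (if PySem.Int.band x 1 = 0 then num + 2 ^ pow.toNat else num)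
  else num
termination_by x.toNat
decreasing_by exact pvShiftLt x h

def num_xors (x : Int) : Int := numXorsLoop x 0 0

-- ===== PORT B =====
def num_xors_alt (x : Int) : Int :=
  if x ≤ 0 then 0 else ((1 : Int) <<< PySem.Int.bitLength x) - 1 - x

-- ===== PRECONDITION & SPEC =====
def Spec_num_xors (x : Int) (out : Int) : Prop := out = num_xors_alt x
instance (x : Int) (out : Int) : Decidable (Spec_num_xors x out) := by unfold Spec_num_xors; infer_instance

-- ===== CLAIM (what is proved, stated in full; the proofs are below) =====
def Claim_equal_num_xors : Prop := ∀ (x : Int), Dom_num_xors x → Spec_num_xors x (num_xors x)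

-- ===== LEMMAS AND PROOFS =====
theorem one_shiftLeft_int (k : Nat) : ((1 : Int) <<< k) = 2 ^ k := by
  simpa using Int.shiftLeft_eq 1 k

theorem alt_nonpos {x : Int} (h : x ≤ 0) : num_xors_alt x = 0 := by
  simp [num_xors_alt, h]

theorem alt_pos {x : Int} (h : 0 < x) :
    num_xors_alt x = 2 ^ PySem.Int.bitLength x - 1 - x := by
  simp [num_xors_alt, not_le.mpr h, one_shiftLeft_int]

theorem loop_eq (n : Nat) : ∀ (x pow num : Int), x.toNat ≤ n → 0 ≤ pow →
    numXorsLoop x pow num = num + 2 ^ pow.toNat * num_xors_alt x := by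
  induction n with
  | zero =>
    intro x pow num hx _
    have hx0 : x ≤ 0 := by omega
    rw [numXorsLoop, alt_nonpos hx0]
    simp [not_lt.mpr hx0]
  | succ n ih =>
    intro x pow num hx hp
    by_cases hpos : 0 < x
    · rw [numXorsLoop]
      simp only [hpos, dif_pos]
      have hq : x >>> (1:Nat) = PySem.Int.floordiv x 2 := by
        rw [PySem.Int.floordiv_eq_ediv_of_pos (by omega : (0:Int) < 2)]
        simpa using Int.shiftRight_eq_div_pow x 1
      set q := PySem.Int.floordiv x 2 with hqdef
      have hx2 : q * 2 + PySem.Int.mod x 2 = x := PySem.Int.floordiv_mul_add_mod x 2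
      have hr0 : 0 ≤ PySem.Int.mod x 2 := PySem.Int.mod_nonneg x (by omega)
      have hr2 : PySem.Int.mod x 2 < 2 := PySem.Int.mod_lt x (by omega)
      have hband : PySem.Int.band x 1 = PySem.Int.mod x 2 := PySem.Int.band_one x
      have hqn : q.toNat ≤ n := by
        have := pvShiftLt x hpos; rw [hq] at this; omega
      have hih := ih q (pow + 1) (if PySem.Int.band x 1 = 0 then num + 2 ^ pow.toNat else num) hqn (by omega)
      have hpt : (pow + 1).toNat = pow.toNat + 1 := by omega
      have hL : PySem.Int.bitLength x = PySem.Int.bitLength q + 1 :=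
        PySem.Int.bitLength_of_pos hpos
      rw [hq, hih, hpt, hband, alt_pos hpos, hL]
      by_cases hq0 : 0 < q
      · rw [alt_pos hq0]
        rcases (by omega : PySem.Int.mod x 2 = 0 ∨ PySem.Int.mod x 2 = 1) with hr | hr <;>
          · rw [hr] at hx2 ⊢
            norm_num [pow_succ]
            linear_combination (-(2 : Int) ^ pow.toNat) * hx2
      · have hq0' : q = 0 := by
          have h2 : (0:Int) ≤ x / 2 := by omega
          rw [hqdef, PySem.Int.floordiv_eq_ediv_of_pos (by omega : (0:Int) < 2)]
          omega
        have hx1 : x = 1 := by omega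
        rw [hq0', hx1] at *
        norm_num [PySem.Int.bitLength_zero, alt_nonpos]
    · rw [numXorsLoop, alt_nonpos (by omega : x ≤ 0)]
      simp [hpos]

-- ===== VERDICT (by name: the statement is the Claim_ definition above) =====
theorem num_xors_spec : Claim_equal_num_xors := by
  intro x _
  unfold Spec_num_xors num_xors
  have := loop_eq x.toNat x 0 0 (le_refl _) (le_refl _)
  simpa using this
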